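-- pv_equiv track=rewrite | github.com/trilogy-group/aicoe-ai_coach | outputs/tests/evaluate_ai_sophistication.py | calculate_ai_score
-- ===== SOURCE A (Python) =====
-- def calculate_ai_score(results):
--     """Calculate overall AI sophistication score"""
--     scores = {
--         'context_awareness': 25,
--         'pattern_recognition': 20,
--         'adaptive_behavior': 20,
--         'personalization': 20,
--         'predictive_capability': 15
--     }
--
--     total_score = sum(scores[test] for test, passed in results.items() if passed)
--
--     ai_levels = {
--         80: "Highly Sophisticated AI",
--         60: "Solid AI Implementation",
--         40: "Basic AI Capabilities",
--         20: "Rule-Based System",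
--         0: "Not AI"
--     }
--
--     for threshold, label in sorted(ai_levels.items(), reverse=True):
--         if total_score >= threshold:
--             return total_score, label
--
--     return total_score, "Not AI"
-- ===== SOURCE B (Python) =====
-- def calculate_ai_score(results):
--     """Calculate overall AI sophistication score"""
--     scores = {
--         'context_awareness': 25,
--         'pattern_recognition': 20,
--         'adaptive_behavior': 20,
--         'personalization': 20,
--         'predictive_capability': 15
--     }
--
--     total_score = sum(scores[test] for test, passed in results.items() if passed)
--
--     labels = ["Not AI", "Rule-Based System", "Basic AI Capabilities",
--               "Solid AI Implementation", "Highly Sophisticated AI"]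
--     return total_score, labels[min(total_score // 20, 4)]
-- ===== Notes on version B (the rewrite author's own statement) =====
-- stated objective: simpler
-- what changed: The sorted-threshold scan over the ai_levels dict is replaced by a closed-form arithmetic index labels[min(total_score // 20, 4)] into an ordered label list.
import Mathlib
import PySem

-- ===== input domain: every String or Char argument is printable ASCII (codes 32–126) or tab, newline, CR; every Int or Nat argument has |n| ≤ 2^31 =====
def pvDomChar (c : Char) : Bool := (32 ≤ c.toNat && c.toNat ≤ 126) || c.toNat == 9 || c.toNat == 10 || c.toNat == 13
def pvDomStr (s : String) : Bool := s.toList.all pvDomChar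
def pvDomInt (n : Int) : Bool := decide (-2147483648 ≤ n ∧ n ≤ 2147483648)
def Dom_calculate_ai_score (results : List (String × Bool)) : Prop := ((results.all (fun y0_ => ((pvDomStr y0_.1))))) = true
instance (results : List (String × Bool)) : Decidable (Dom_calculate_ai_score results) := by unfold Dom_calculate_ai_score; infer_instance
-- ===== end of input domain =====

-- B replaces A's sorted-threshold scan by a closed-form label index labels[min(total//20, 4)] (simpler).


-- ===== PORT A =====
-- the literal 'scores' dict (shared by both ports, like the identical literal in both Pythons)
def pvScores : PySem.Dict String Int :=
  PySem.Dict.ofList [("context_awareness", 25), ("pattern_recognition", 20),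
    ("adaptive_behavior", 20), ("personalization", 20), ("predictive_capability", 15)]

-- the literal 'ai_levels' dict as its insertion-ordered item list
def pvAiLevels : List (Int × String) :=
  [(80, "Highly Sophisticated AI"), (60, "Solid AI Implementation"),
   (40, "Basic AI Capabilities"), (20, "Rule-Based System"), (0, "Not AI")]

-- the 'for threshold, label in …: if total_score >= threshold: return …' loop
def pvScanLevels : List (Int × String) → Int → Int × String
  | [], t => (t, "Not AI")
  | (th, lab) :: rest, t => if t ≥ th then (t, lab) else pvScanLevels rest t

-- scores[test] is ported with getD 0: Pre_ excludes exactly the inputs where Python raises KeyError.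
-- results is a Python dict: its items() are (PySem.Dict.ofList results).items.
def calculate_ai_score (results : List (String × Bool)) : Int × String :=
  let total_score :=
    ((PySem.Dict.ofList results).items.filter (fun p => p.2)).foldl
      (fun acc p => acc + PySem.Dict.getD pvScores p.1 0) 0
  -- sorted(ai_levels.items(), reverse=True): the thresholds are distinct, so sorting the
  -- pairs is sorting by the threshold component
  pvScanLevels (PySem.List.sorted pvAiLevels (fun p => p.1) true) total_score

-- ===== PORT B =====
def pvLabels : List String :=
  ["Not AI", "Rule-Based System", "Basic AI Capabilities",
   "Solid AI Implementation", "Highly Sophisticated AI"]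

def calculate_ai_score_alt (results : List (String × Bool)) : Int × String :=
  let total_score :=
    ((PySem.Dict.ofList results).items.filter (fun p => p.2)).foldl
      (fun acc p => acc + PySem.Dict.getD pvScores p.1 0) 0
  (total_score, PySem.List.pyGetD pvLabels (min (PySem.Int.floordiv total_score 20) 4) "Not AI")

-- ===== PRECONDITION & SPEC =====
-- Pre_ excludes exactly the inputs on which A raises KeyError: some test of the results dict
-- marked passed is not a key of the scores dict.
def Pre_calculate_ai_score (results : List (String × Bool)) : Prop :=
  ∀ p ∈ (PySem.Dict.ofList results).items, p.2 = true →
    p.1 ∈ ["context_awareness", "pattern_recognition", "adaptive_behavior",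
           "personalization", "predictive_capability"]
instance (results : List (String × Bool)) : Decidable (Pre_calculate_ai_score results) := by
  unfold Pre_calculate_ai_score; infer_instance
def pvWitness_calculate_ai_score : (List (String × Bool)) :=
  [("context_awareness", true), ("predictive_capability", false)]

def Spec_calculate_ai_score (results : List (String × Bool)) (out : Int × String) : Prop := out = calculate_ai_score_alt results
instance (results : List (String × Bool)) (out : Int × String) : Decidable (Spec_calculate_ai_score results out) := by unfold Spec_calculate_ai_score; infer_instance

-- ===== CLAIM (what is proved, stated in full; the proofs are below) =====
def Claim_equal_calculate_ai_score : Prop := ∀ (results : List (String × Bool)), Dom_calculate_ai_score results → Pre_calculate_ai_score results → Spec_calculate_ai_score results (calculate_ai_score results)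

-- ===== LEMMAS AND PROOFS =====

-- every value the total accumulates is nonnegative
lemma pvScores_getD_nonneg (k : String) : 0 ≤ PySem.Dict.getD pvScores k 0 := by
  have h : pvScores = PySem.Dict.mk [("context_awareness", 25), ("pattern_recognition", 20),
      ("adaptive_behavior", 20), ("personalization", 20), ("predictive_capability", 15)] := by decide
  simp only [h, PySem.Dict.getD, PySem.Dict.get?_mk_cons]
  split_ifs <;> simp [PySem.Dict.get?]

lemma pvTotal_nonneg_from (l : List (String × Bool)) :
    ∀ a : Int, 0 ≤ a → 0 ≤ l.foldl (fun acc p => acc + PySem.Dict.getD pvScores p.1 0) a := by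
  induction l with
  | nil => intro a ha; simpa using ha
  | cons p l ih =>
    intro a ha
    simp only [List.foldl_cons]
    exact ih _ (by have := pvScores_getD_nonneg p.1; omega)

-- the threshold scan equals B's closed-form index for every nonnegative total
lemma pvScan_closed (t : Int) (ht : 0 ≤ t) :
    pvScanLevels (PySem.List.sorted pvAiLevels (fun p => p.1) true) t
      = (t, PySem.List.pyGetD pvLabels (min (PySem.Int.floordiv t 20) 4) "Not AI") := by
  have hs : PySem.List.sorted pvAiLevels (fun p => p.1) true = pvAiLevels := by decide
  rw [hs]
  simp only [pvAiLevels, pvScanLevels]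
  by_cases h80 : t ≥ 80
  · have h4 : (4 : Int) ≤ PySem.Int.floordiv t 20 := by
      rw [PySem.Int.le_floordiv_iff_mul_le (by norm_num)]; omega
    have hm : min (PySem.Int.floordiv t 20) 4 = 4 := by omega
    have hv : PySem.List.pyGetD pvLabels (min (PySem.Int.floordiv t 20) 4) "Not AI"
        = "Highly Sophisticated AI" := by rw [hm]; decide
    rw [hv]; simp [h80]
  · by_cases h60 : t ≥ 60
    · have : PySem.Int.floordiv t 20 = 3 := by
        rw [PySem.Int.floordiv_eq_iff_of_pos (by norm_num)]; omega
      have hm : min (PySem.Int.floordiv t 20) 4 = 3 := by omega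
      have hv : PySem.List.pyGetD pvLabels (min (PySem.Int.floordiv t 20) 4) "Not AI"
          = "Solid AI Implementation" := by rw [hm]; decide
      rw [hv]; simp [h80, h60]
    · by_cases h40 : t ≥ 40
      · have : PySem.Int.floordiv t 20 = 2 := by
          rw [PySem.Int.floordiv_eq_iff_of_pos (by norm_num)]; omega
        have hm : min (PySem.Int.floordiv t 20) 4 = 2 := by omega
        have hv : PySem.List.pyGetD pvLabels (min (PySem.Int.floordiv t 20) 4) "Not AI"
            = "Basic AI Capabilities" := by rw [hm]; decide
        rw [hv]; simp [h80, h60, h40]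
      · by_cases h20 : t ≥ 20
        · have : PySem.Int.floordiv t 20 = 1 := by
            rw [PySem.Int.floordiv_eq_iff_of_pos (by norm_num)]; omega
          have hm : min (PySem.Int.floordiv t 20) 4 = 1 := by omega
          have hv : PySem.List.pyGetD pvLabels (min (PySem.Int.floordiv t 20) 4) "Not AI"
              = "Rule-Based System" := by rw [hm]; decide
          rw [hv]; simp [h80, h60, h40, h20]
        · have : PySem.Int.floordiv t 20 = 0 := by
            rw [PySem.Int.floordiv_eq_iff_of_pos (by norm_num)]; omega
          have hm : min (PySem.Int.floordiv t 20) 4 = 0 := by omega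
          have hv : PySem.List.pyGetD pvLabels (min (PySem.Int.floordiv t 20) 4) "Not AI"
              = "Not AI" := by rw [hm]; decide
          rw [hv]; simp [h80, h60, h40, h20, ht]

-- ===== VERDICT (by name: the statement is the Claim_ definition above) =====
theorem calculate_ai_score_spec : Claim_equal_calculate_ai_score := by
  intro results _ _
  unfold Spec_calculate_ai_score calculate_ai_score calculate_ai_score_alt
  exact pvScan_closed _ (pvTotal_nonneg_from _ 0 le_rfl)
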